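-- pv_equiv track=rewrite | github.com/Mavericks-2/model | servidor.py | getPlanogramScheme
-- ===== SOURCE A (Python) =====
-- def getPlanogramScheme(coordinates):
--     """
--     Función que obtiene el esquema del planograma
--     :param coordinates: Coordenadas de los productos
--     :return: Esquema del planograma
--     """
--     #  Ordenar las coordenadas por y
--     coordinates.sort(key=lambda x: x["y"])
--
--     # Definir diccionario
--     result = {}
--     for coordinate in coordinates:
--         if coordinate["y"] in result:
--             result[coordinate["y"]].append(coordinate)
--         else:
--             result[coordinate["y"]] = []
--             result[coordinate["y"]].append(coordinate)
--
--     # Por cada fila, ordenar por x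
--     for row in result:
--         result[row].sort(key=lambda x: x["x"])
--
--     #  Generar el planograma final [[{}]]
--     result = list(result.values())
--
--     return result
-- ===== SOURCE B (Python) =====
-- def getPlanogramScheme(coordinates):
--     """
--     Función que obtiene el esquema del planograma
--     :param coordinates: Coordenadas de los productos
--     :return: Esquema del planograma
--     """
--     # Sort in place by y (same mutation as the original)
--     coordinates.sort(key=lambda c: c["y"])
--
--     # Single pass over the y-sorted list: collect consecutive runs of equal y,
--     # emitting each run sorted by x.  No dictionary needed.
--     result = []
--     run = []
--     for c in coordinates:
--         if run and run[-1]["y"] != c["y"]: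
--             result.append(sorted(run, key=lambda r: r["x"]))
--             run = []
--         run.append(c)
--     if run:
--         result.append(sorted(run, key=lambda r: r["x"]))
--     return result
-- ===== Notes on version B (the rewrite author's own statement) =====
-- stated objective: simpler
-- what changed: Replaces A's y-keyed dict grouping (membership branch, a second pass sorting each bucket, then list(values())) by a single pass over the y-sorted list that collects consecutive equal-y runs and emits each run sorted by x; Pre_ excludes coordinates missing an 'x' or 'y' key (A raises KeyError) and association lists with duplicate keys, which no Python dict input can represent.
import Mathlib
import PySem

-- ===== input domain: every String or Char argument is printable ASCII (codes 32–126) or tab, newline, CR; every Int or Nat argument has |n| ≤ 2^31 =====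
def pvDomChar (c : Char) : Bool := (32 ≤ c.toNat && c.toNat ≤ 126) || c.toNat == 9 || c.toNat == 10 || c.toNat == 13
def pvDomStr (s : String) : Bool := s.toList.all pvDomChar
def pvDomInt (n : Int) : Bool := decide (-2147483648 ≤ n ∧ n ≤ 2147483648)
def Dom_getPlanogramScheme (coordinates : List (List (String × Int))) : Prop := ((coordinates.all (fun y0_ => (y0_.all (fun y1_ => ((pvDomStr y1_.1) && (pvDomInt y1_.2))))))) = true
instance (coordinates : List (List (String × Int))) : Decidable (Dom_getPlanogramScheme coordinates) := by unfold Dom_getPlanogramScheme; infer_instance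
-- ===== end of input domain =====

-- B groups the y-sorted list by collecting consecutive equal-y runs in one pass (no dict);
-- A sorts its argument in place, B performs the same in-place sort, and the equivalence proved here is about the return value.

-- c[k] for a coordinate dict c (KeyError when k is absent: Pre_ keeps k present)
def pvCoordVal (c : List (String × Int)) (k : String) : Int :=
  (PySem.Dict.mk c).getD k 0

-- sorted(row, key=lambda r: r["x"])
def pvSortRow (row : List (List (String × Int))) : List (List (String × Int)) :=
  PySem.List.sorted row (fun r => pvCoordVal r "x")

-- ===== PORT A =====
-- loop body of A's grouping loop: if y in result: append else: result[y] = []; append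
def pvStepA (d : PySem.Dict Int (List (List (String × Int)))) (c : List (String × Int)) :
    PySem.Dict Int (List (List (String × Int))) :=
  if d.contains (pvCoordVal c "y") then
    d.insert (pvCoordVal c "y") (d.getD (pvCoordVal c "y") [] ++ [c])
  else
    d.insert (pvCoordVal c "y") ([] ++ [c])

def getPlanogramScheme (coordinates : List (List (String × Int))) : List (List (List (String × Int))) :=
  let coords := PySem.List.sorted coordinates (fun c => pvCoordVal c "y")
  let result := coords.foldl pvStepA (PySem.Dict.mk [])
  -- for row in result: result[row].sort(key=lambda x: x["x"])
  let result := PySem.Dict.mk (result.items.map (fun kv => (kv.1, pvSortRow kv.2)))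
  result.values

-- ===== PORT B =====
-- loop body of B's run-collecting loop over the y-sorted list (state: rows emitted so far, current run)
def pvStepB (st : List (List (List (String × Int))) × List (List (String × Int)))
    (c : List (String × Int)) :
    List (List (List (String × Int))) × List (List (String × Int)) :=
  match st.2.getLast? with
  | some l =>
      if pvCoordVal l "y" ≠ pvCoordVal c "y" then (st.1 ++ [pvSortRow st.2], [c])
      else (st.1, st.2 ++ [c])
  | none => (st.1, st.2 ++ [c])

def getPlanogramScheme_alt (coordinates : List (List (String × Int))) : List (List (List (String × Int))) :=
  let coords := PySem.List.sorted coordinates (fun c => pvCoordVal c "y")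
  let st := coords.foldl pvStepB ([], [])
  if st.2 ≠ [] then st.1 ++ [pvSortRow st.2] else st.1

-- ===== PRECONDITION & SPEC =====
-- Pre_ excludes coordinates missing an "x" or "y" key, on which A raises KeyError, and coordinates whose
-- association-list encoding has duplicate keys, where the dict representation is ambiguous (Python keeps the last value).
def Pre_getPlanogramScheme (coordinates : List (List (String × Int))) : Prop :=
  ∀ c ∈ coordinates, (c.map Prod.fst).Nodup ∧ "x" ∈ c.map Prod.fst ∧ "y" ∈ c.map Prod.fst
instance (coordinates : List (List (String × Int))) : Decidable (Pre_getPlanogramScheme coordinates) := by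
  unfold Pre_getPlanogramScheme; infer_instance

def pvWitness_getPlanogramScheme : (List (List (String × Int))) :=
  [[("x", 1), ("y", 2)], [("y", 0), ("x", 3)], [("x", 0), ("y", 2)]]

def Spec_getPlanogramScheme (coordinates : List (List (String × Int))) (out : List (List (List (String × Int)))) : Prop := out = getPlanogramScheme_alt coordinates
instance (coordinates : List (List (String × Int))) (out : List (List (List (String × Int)))) : Decidable (Spec_getPlanogramScheme coordinates out) := by unfold Spec_getPlanogramScheme; infer_instance

-- ===== CLAIM (what is proved, stated in full; the proofs are below) =====
def Claim_equal_getPlanogramScheme : Prop := ∀ (coordinates : List (List (String × Int))), Dom_getPlanogramScheme coordinates → Pre_getPlanogramScheme coordinates → Spec_getPlanogramScheme coordinates (getPlanogramScheme coordinates)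

-- ===== LEMMAS AND PROOFS =====

theorem pvWitness_ok :
    Dom_getPlanogramScheme pvWitness_getPlanogramScheme ∧ Pre_getPlanogramScheme pvWitness_getPlanogramScheme := by
  decide

-- get? on an items list ending in (k, v) whose earlier keys all differ from k
theorem pvGet?_append_self {ρ : Type} (D : List (Int × ρ)) (k : Int) (v : ρ)
    (h : ∀ p ∈ D, p.1 ≠ k) :
    (PySem.Dict.mk (D ++ [(k, v)])).get? k = some v := by
  have hf : D.find? (fun p => p.1 == k) = none :=
    List.find?_eq_none.mpr (fun p hp => by simp [h p hp])
  simp [PySem.Dict.get?, List.find?_append, hf]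

theorem pvGet?_append_none {ρ : Type} (D : List (Int × ρ)) (k k' : Int) (v : ρ)
    (h : ∀ p ∈ D, p.1 ≠ k') (hk : k ≠ k') :
    (PySem.Dict.mk (D ++ [(k, v)])).get? k' = none := by
  simp [PySem.Dict.get?, List.find?_append, List.find?_eq_none, hk]
  intro a b hab
  exact h (a, b) hab

theorem pvContains_append_self {ρ : Type} (D : List (Int × ρ)) (k : Int) (v : ρ)
    (h : ∀ p ∈ D, p.1 ≠ k) :
    (PySem.Dict.mk (D ++ [(k, v)])).contains k = true := by
  rw [PySem.Dict.contains_eq_isSome_get?, pvGet?_append_self D k v h]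
  rfl

theorem pvContains_append_none {ρ : Type} (D : List (Int × ρ)) (k k' : Int) (v : ρ)
    (h : ∀ p ∈ D, p.1 ≠ k') (hk : k ≠ k') :
    (PySem.Dict.mk (D ++ [(k, v)])).contains k' = false := by
  rw [PySem.Dict.contains_eq_isSome_get?, pvGet?_append_none D k k' v h hk]
  rfl

theorem pvInsert_append_self {ρ : Type} (D : List (Int × ρ)) (k : Int) (v w : ρ)
    (h : ∀ p ∈ D, p.1 ≠ k) :
    (PySem.Dict.mk (D ++ [(k, v)])).insert k w = PySem.Dict.mk (D ++ [(k, w)]) := by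
  simp only [PySem.Dict.insert, pvContains_append_self D k v h, if_pos]
  congr 1
  simp only [List.map_append]
  congr 1
  · have h1 : D.map (fun p => if (p.1 == k) = true then (k, w) else p) = D.map id :=
      List.map_congr_left (fun p hp => by simp [h p hp])
    rw [h1, List.map_id]
  · simp

theorem pvInsert_append_new {ρ : Type} (D : List (Int × ρ)) (k k' : Int) (v w : ρ)
    (h : ∀ p ∈ D, p.1 ≠ k') (hk : k ≠ k') :
    (PySem.Dict.mk (D ++ [(k, v)])).insert k' w = PySem.Dict.mk (D ++ [(k, v)] ++ [(k', w)]) := by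
  simp only [PySem.Dict.insert, pvContains_append_none D k k' v h hk, Bool.false_eq_true,
    if_false]

-- the main loop correspondence: A's dict fold and B's run fold, from matching intermediate states
theorem pvLoop (xs : List (List (String × Int))) :
    ∀ (D : List (Int × List (List (String × Int)))) (k : Int) (run : List (List (String × Int))),
    run ≠ [] →
    (∀ a ∈ run, pvCoordVal a "y" = k) →
    (∀ p ∈ D, p.1 < k) →
    (∀ x ∈ xs, k ≤ pvCoordVal x "y") →
    xs.Pairwise (fun a b => pvCoordVal a "y" ≤ pvCoordVal b "y") →
    ((xs.foldl pvStepA (PySem.Dict.mk (D ++ [(k, run)]))).items.map (fun kv => pvSortRow kv.2)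
        = (xs.foldl pvStepB (D.map (fun p => pvSortRow p.2), run)).1
          ++ [pvSortRow (xs.foldl pvStepB (D.map (fun p => pvSortRow p.2), run)).2]
      ∧ (xs.foldl pvStepB (D.map (fun p => pvSortRow p.2), run)).2 ≠ []) := by
  induction xs with
  | nil =>
      intro D k run hrun _ _ _ _
      refine ⟨?_, hrun⟩
      simp
  | cons c xs ih =>
      intro D k run hrun hry hDk hge hpw
      have hkc : k ≤ pvCoordVal c "y" := hge c (List.mem_cons_self)
      have hDne : ∀ p ∈ D, p.1 ≠ k := fun p hp => ne_of_lt (hDk p hp)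
      have hlast : run.getLast? = some (run.getLast hrun) := List.getLast?_eq_some_getLast hrun
      have hlastY : pvCoordVal (run.getLast hrun) "y" = k := hry _ (List.getLast_mem hrun)
      have hpw' := (List.pairwise_cons.mp hpw)
      by_cases hyc : pvCoordVal c "y" = k
      · -- c joins the current run
        have hA : pvStepA (PySem.Dict.mk (D ++ [(k, run)])) c
            = PySem.Dict.mk (D ++ [(k, run ++ [c])]) := by
          unfold pvStepA
          rw [hyc, pvContains_append_self D k run hDne, if_pos rfl,
            PySem.Dict.getD_eq_get?_getD, pvGet?_append_self D k run hDne,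
            pvInsert_append_self D k run _ hDne]
          rfl
        have hB : pvStepB (D.map (fun p => pvSortRow p.2), run) c
            = (D.map (fun p => pvSortRow p.2), run ++ [c]) := by
          unfold pvStepB
          simp only [hlast, hlastY, hyc, ne_eq, not_true_eq_false, if_false]
        simp only [List.foldl_cons, hA, hB]
        exact ih D k (run ++ [c]) (by simp)
          (by intro a ha; rcases List.mem_append.mp ha with h | h
              · exact hry a h
              · simp at h; simp [h, hyc])
          hDk
          (fun x hx => le_trans (le_of_eq hyc.symm) (hpw'.1 x hx))
          hpw'.2
      · -- a new, strictly larger y starts a new run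
        have hklt : k < pvCoordVal c "y" := lt_of_le_of_ne hkc (fun h => hyc h.symm)
        have hA : pvStepA (PySem.Dict.mk (D ++ [(k, run)])) c
            = PySem.Dict.mk ((D ++ [(k, run)]) ++ [(pvCoordVal c "y", [] ++ [c])]) := by
          unfold pvStepA
          rw [pvContains_append_none D k (pvCoordVal c "y") run
              (fun p hp => ne_of_lt (lt_trans (hDk p hp) hklt)) (ne_of_lt hklt)]
          simp only [Bool.false_eq_true, if_false]
          exact pvInsert_append_new D k (pvCoordVal c "y") run ([] ++ [c])
            (fun p hp => ne_of_lt (lt_trans (hDk p hp) hklt)) (ne_of_lt hklt)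
        have hB : pvStepB (D.map (fun p => pvSortRow p.2), run) c
            = (D.map (fun p => pvSortRow p.2) ++ [pvSortRow run], [c]) := by
          unfold pvStepB
          simp only [hlast, hlastY]
          rw [if_pos (fun h => hyc h.symm)]
        simp only [List.foldl_cons, hA, hB]
        have := ih (D ++ [(k, run)]) (pvCoordVal c "y") [c]
          (by simp)
          (by intro a ha; simp at ha; simp [ha])
          (by intro p hp; rcases List.mem_append.mp hp with h | h
              · exact lt_trans (hDk p h) hklt
              · simp at h; simp [h, hklt])
          (fun x hx => hpw'.1 x hx)
          hpw'.2
        simpa using this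

-- ===== VERDICT (by name: the statement is the Claim_ definition above) =====
theorem getPlanogramScheme_spec : Claim_equal_getPlanogramScheme := by
  intro coordinates _ _
  unfold Spec_getPlanogramScheme getPlanogramScheme getPlanogramScheme_alt
  have hpw : (PySem.List.sorted coordinates (fun c => pvCoordVal c "y")).Pairwise
      (fun a b => pvCoordVal a "y" ≤ pvCoordVal b "y") :=
    PySem.List.sorted_pairwise coordinates (fun c => pvCoordVal c "y")
  cases hs : PySem.List.sorted coordinates (fun c => pvCoordVal c "y") with
  | nil => simp [PySem.Dict.values]
  | cons c rest =>
      rw [hs] at hpw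
      have hpw' := List.pairwise_cons.mp hpw
      have hA0 : pvStepA (PySem.Dict.mk []) c
          = PySem.Dict.mk ([] ++ [(pvCoordVal c "y", [] ++ [c])]) := by
        unfold pvStepA
        simp [PySem.Dict.insert, PySem.Dict.contains]
      have hB0 : pvStepB ([], []) c = ([], [c]) := by
        unfold pvStepB
        simp
      have hmain := pvLoop rest [] (pvCoordVal c "y") [c]
        (by simp)
        (by intro a ha; simp at ha; simp [ha])
        (by simp)
        (fun x hx => hpw'.1 x hx)
        hpw'.2
      simp only [List.foldl_cons, hA0, hB0]
      simp only [List.map_nil] at hmain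
      rw [if_pos hmain.2]
      rw [← hmain.1]
      simp [PySem.Dict.values, Function.comp]
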